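-- pv_equiv track=rewrite | github.com/skjshr/protosite2 | scripts/router.py | touched_forbidden_paths
-- ===== SOURCE A (Python) =====
-- def touched_forbidden_paths(changed_files: list[str], forbidden_paths: list[str]) -> list[str]:
--     matched = []
--     for changed in changed_files:
--         normalized_changed = changed.replace("\\", "/")
--         for forbidden in forbidden_paths:
--             normalized_forbidden = forbidden.replace("\\", "/").rstrip("/")
--             if (
--                 normalized_changed == normalized_forbidden
--                 or normalized_changed.startswith(normalized_forbidden + "/")
--             ):
--                 matched.append(changed)
--                 break
--     return matched
-- ===== SOURCE B (Python) =====
-- def touched_forbidden_paths(changed_files: list[str], forbidden_paths: list[str]) -> list[str]: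
--     fset = {f.replace("\\", "/").rstrip("/") for f in forbidden_paths}
--     matched = []
--     for changed in changed_files:
--         nc = changed.replace("\\", "/")
--         if nc in fset or any(ch == "/" and nc[:i] in fset for i, ch in enumerate(nc)):
--             matched.append(changed)
--     return matched
-- ===== Notes on version B (the rewrite author's own statement) =====
-- stated objective: faster
-- what changed: A rescans (and re-normalizes) every forbidden path for every changed file; B builds the set of normalized forbidden paths once and tests each changed file's '/'-delimited ancestor prefixes by set lookup.
import Mathlib
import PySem

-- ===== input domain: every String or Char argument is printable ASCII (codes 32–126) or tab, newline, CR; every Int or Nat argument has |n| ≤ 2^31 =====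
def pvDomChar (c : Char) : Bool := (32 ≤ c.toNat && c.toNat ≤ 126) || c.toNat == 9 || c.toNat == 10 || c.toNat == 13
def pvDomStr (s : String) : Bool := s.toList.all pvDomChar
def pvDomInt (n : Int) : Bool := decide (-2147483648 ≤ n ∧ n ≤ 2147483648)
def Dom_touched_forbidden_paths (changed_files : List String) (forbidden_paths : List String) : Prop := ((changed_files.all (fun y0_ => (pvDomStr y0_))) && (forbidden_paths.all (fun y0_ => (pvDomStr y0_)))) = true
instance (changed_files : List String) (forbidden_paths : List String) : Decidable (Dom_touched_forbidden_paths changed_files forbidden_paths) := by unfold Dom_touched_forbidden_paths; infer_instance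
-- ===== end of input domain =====

-- B replaces A's scan of every forbidden path per changed file by one normalized-forbidden set built
-- once, testing each '/'-delimited ancestor prefix of the changed file by set lookup (objective: faster).

-- ===== PORT A =====
-- hand-port of Python's s.rstrip("/") (drop trailing '/' characters); exact since the strip set is the single char '/'
def pvRstripSlash (cs : List Char) : List Char := (cs.reverse.dropWhile (fun c => c == '/')).reverse

-- forbidden.replace("\\", "/").rstrip("/") — the same builtin composition both Pythons apply
def pvNormF (f : String) : List Char := pvRstripSlash (PySem.Chars.replace f.toList ['\\'] ['/'])

-- A's inner 'for forbidden in forbidden_paths: … append; break'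
def pvLoopA (nc : List Char) (changed : String) (matched : List String) : List String → List String
  | [] => matched
  | f :: rest =>
    let nf := pvNormF f
    if nc == nf || PySem.Chars.startswith nc (nf ++ ['/']) then matched ++ [changed]
    else pvLoopA nc changed matched rest

def touched_forbidden_paths (changed_files : List String) (forbidden_paths : List String) : List String :=
  changed_files.foldl
    (fun matched changed =>
      pvLoopA (PySem.Chars.replace changed.toList ['\\'] ['/']) changed matched forbidden_paths)
    []

-- ===== PORT B =====
def touched_forbidden_paths_alt (changed_files : List String) (forbidden_paths : List String) : List String :=
  let fset : PySem.Set (List Char) := PySem.Set.ofList (forbidden_paths.map pvNormF)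
  changed_files.foldl
    (fun matched changed =>
      let nc := PySem.Chars.replace changed.toList ['\\'] ['/']
      if PySem.Set.contains fset nc ||
          (PySem.List.enumerate nc 0).any
            (fun p => p.2 == '/' && PySem.Set.contains fset (PySem.List.slice nc none (some p.1)))
      then matched ++ [changed] else matched)
    []

-- ===== PRECONDITION & SPEC =====
def Spec_touched_forbidden_paths (changed_files : List String) (forbidden_paths : List String) (out : List String) : Prop := out = touched_forbidden_paths_alt changed_files forbidden_paths
instance (changed_files : List String) (forbidden_paths : List String) (out : List String) : Decidable (Spec_touched_forbidden_paths changed_files forbidden_paths out) := by unfold Spec_touched_forbidden_paths; infer_instance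

-- ===== CLAIM (what is proved, stated in full; the proofs are below) =====
def Claim_equal_touched_forbidden_paths : Prop := ∀ (changed_files : List String) (forbidden_paths : List String), Dom_touched_forbidden_paths changed_files forbidden_paths → Spec_touched_forbidden_paths changed_files forbidden_paths (touched_forbidden_paths changed_files forbidden_paths)

-- ===== LEMMAS AND PROOFS =====

-- A's inner loop appends the file iff some forbidden path matches
theorem pvLoopA_eq_if (nc : List Char) (c : String) (matched : List String) (fps : List String) :
    pvLoopA nc c matched fps =
      if fps.any (fun f => nc == pvNormF f || PySem.Chars.startswith nc (pvNormF f ++ ['/']))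
      then matched ++ [c] else matched := by
  induction fps with
  | nil => simp [pvLoopA]
  | cons f rest ih =>
    simp only [pvLoopA, List.any_cons, Bool.or_eq_true, beq_iff_eq, ih]
    by_cases h : nc = pvNormF f ∨ PySem.Chars.startswith nc (pvNormF f ++ ['/']) = true
    · simp [h]
    · simp [h]

-- t + "/" is a prefix of s iff t is the part of s before some '/' character
theorem pvPrefix_slash_iff (s t : List Char) :
    (t ++ ['/'] <+: s) ↔ ∃ i, ∃ h : i < s.length, s[i] = '/' ∧ s.take i = t := by
  constructor
  · rintro ⟨u, hu⟩
    subst hu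
    refine ⟨t.length, by simp, ?_, ?_⟩
    · simp [List.getElem_append_right]
    · rw [List.append_assoc, List.take_left]
  · rintro ⟨i, h, hc, ht⟩
    refine ⟨s.drop (i + 1), ?_⟩
    rw [List.append_assoc, ← ht]
    simp only [List.singleton_append, ← hc]
    rw [List.getElem_cons_drop h, List.take_append_drop]

-- the per-file hit tests of A and B agree
theorem pvHit_eq (fps : List String) (nc : List Char) :
    (fps.any (fun f => nc == pvNormF f || PySem.Chars.startswith nc (pvNormF f ++ ['/']))) =
    (PySem.Set.contains (PySem.Set.ofList (fps.map pvNormF)) nc ||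
      (PySem.List.enumerate nc 0).any
        (fun p => p.2 == '/' &&
          PySem.Set.contains (PySem.Set.ofList (fps.map pvNormF)) (PySem.List.slice nc none (some p.1)))) := by
  rw [Bool.eq_iff_iff]
  simp only [List.any_eq_true, Bool.or_eq_true, Bool.and_eq_true, beq_iff_eq,
    PySem.Chars.startswith_iff, PySem.Set.contains_iff, PySem.Set.mem_ofList, List.mem_map,
    PySem.List.mem_enumerate_iff, pvPrefix_slash_iff]
  constructor
  · rintro ⟨f, hf, hnc | ⟨i, hi, hslash, htake⟩⟩
    · exact Or.inl ⟨f, hf, hnc.symm⟩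
    · refine Or.inr ⟨((i : Int), nc[i]), ⟨i, hi, by simp⟩, by simpa using hslash, ?_⟩
      rw [show ((i : Int), nc[i]).1 = ((i : Nat) : Int) from rfl, PySem.List.slice_to_natCast]
      exact ⟨f, hf, htake.symm⟩
  · rintro (⟨f, hf, hnc⟩ | ⟨p, ⟨k, hk, hp⟩, hslash, f, hf, htake⟩)
    · exact ⟨f, hf, Or.inl hnc.symm⟩
    · subst hp
      rw [show (((0 : Int) + (k : Nat), nc[k]) : Int × Char).1 = ((k : Nat) : Int) by simp,
        PySem.List.slice_to_natCast] at htake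
      refine ⟨f, hf, Or.inr ⟨k, hk, ?_, htake.symm⟩⟩
      simpa using hslash

-- ===== VERDICT (by name: the statement is the Claim_ definition above) =====
theorem touched_forbidden_paths_spec : Claim_equal_touched_forbidden_paths := by
  intro changed_files forbidden_paths _
  unfold Spec_touched_forbidden_paths touched_forbidden_paths touched_forbidden_paths_alt
  refine congrFun (congrFun (congrArg _ (funext fun matched => funext fun changed => ?_)) []) changed_files
  rw [pvLoopA_eq_if, pvHit_eq]
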